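-- pv_equiv track=rewrite | github.com/mo-tgeddes/advent-of-code | advent_of_code/day_six/lanternfish.py | fast_fish
-- ===== SOURCE A (Python) =====
-- def fast_fish(days, fishes):
--     if days > 0:
--         counter = fishes.count(0)
--         newfish = [6 if x==0 else x-1 for x in fishes]
--         for index in range(counter):
--             newfish.append(8)
--         fishes = fast_fish((days-1), newfish)
--     return fishes
-- ===== SOURCE B (Python) =====
-- def fast_fish(days, fishes):
--     while days > 0:
--         fishes = [6 if x == 0 else x - 1 for x in fishes] + [8] * fishes.count(0)
--         days -= 1
--     return fishes
-- ===== Notes on version B (the rewrite author's own statement) =====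
-- stated objective: idiomatic
-- what changed: Replaces the recursion with an iterative while-loop that builds each day's list in one expression ([...] + [8]*count) instead of a comprehension followed by an append loop.
-- outside the precondition, e.g. on fast_fish(995, []): A returns [], B returns []
import Mathlib
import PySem

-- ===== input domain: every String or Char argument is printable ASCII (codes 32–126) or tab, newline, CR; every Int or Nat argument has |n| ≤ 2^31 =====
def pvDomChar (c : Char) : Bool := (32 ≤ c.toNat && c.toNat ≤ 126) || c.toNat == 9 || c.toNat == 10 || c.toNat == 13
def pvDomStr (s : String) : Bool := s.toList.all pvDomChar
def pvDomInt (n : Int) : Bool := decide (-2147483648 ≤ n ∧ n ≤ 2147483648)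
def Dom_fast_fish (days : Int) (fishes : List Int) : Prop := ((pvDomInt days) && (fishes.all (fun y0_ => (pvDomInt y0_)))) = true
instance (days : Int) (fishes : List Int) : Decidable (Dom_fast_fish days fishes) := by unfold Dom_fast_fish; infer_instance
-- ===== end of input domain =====

-- B replaces A's recursion by an iterative while-loop building each day's list in one expression (idiomatic; same cost).

-- ===== PORT A =====
def fast_fish (days : Int) (fishes : List Int) : List Int :=
  if days > 0 then
    let counter := PySem.List.count fishes 0
    let newfish := fishes.map (fun x => if x == 0 then (6 : Int) else x - 1)
    let newfish := (PySem.List.pyRange 0 (counter : Int) 1).foldl (fun acc _ => acc ++ [(8 : Int)]) newfish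
    fast_fish (days - 1) newfish
  else fishes
termination_by days.toNat
decreasing_by omega

-- ===== PORT B =====
-- the 'while days > 0: … days -= 1' loop runs exactly days.toNat times (days decreases by 1 each pass)
def fastFishWhile : Nat → List Int → List Int
  | 0, fishes => fishes
  | Nat.succ k, fishes =>
      fastFishWhile k
        (fishes.map (fun x => if x == 0 then (6 : Int) else x - 1)
          ++ PySem.List.pyRepeat [(8 : Int)] ((PySem.List.count fishes 0 : Nat) : Int))

def fast_fish_alt (days : Int) (fishes : List Int) : List Int :=
  fastFishWhile days.toNat fishes

-- ===== PRECONDITION & SPEC =====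
-- Pre_ excludes day counts at or beyond Python's default recursion limit, where A (which
-- recurses once per day) raises RecursionError; the bound 990 is slightly conservative
-- (the exact limit is machine/context dependent, ~997 here), so a thin margin where A
-- still returns is excluded too (see the cite).
def Pre_fast_fish (days : Int) (fishes : List Int) : Prop := days ≤ 990
instance (days : Int) (fishes : List Int) : Decidable (Pre_fast_fish days fishes) := by unfold Pre_fast_fish; infer_instance
def pvWitness_fast_fish : Int × List Int := (80, [1, 2, 0, 4, 8])

def Spec_fast_fish (days : Int) (fishes : List Int) (out : List Int) : Prop := out = fast_fish_alt days fishes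
instance (days : Int) (fishes : List Int) (out : List Int) : Decidable (Spec_fast_fish days fishes out) := by unfold Spec_fast_fish; infer_instance

-- ===== CLAIM (what is proved, stated in full; the proofs are below) =====
def Claim_equal_fast_fish : Prop := ∀ (days : Int) (fishes : List Int), Dom_fast_fish days fishes → Pre_fast_fish days fishes → Spec_fast_fish days fishes (fast_fish days fishes)

-- ===== LEMMAS AND PROOFS =====

-- appending [8] once per element of a list is appending a replicate
lemma foldl_append_eight (l : List Int) (acc : List Int) :
    l.foldl (fun acc _ => acc ++ [(8 : Int)]) acc = acc ++ List.replicate l.length 8 := by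
  induction l generalizing acc with
  | nil => simp
  | cons x t ih =>
      simp only [List.foldl_cons, ih, List.length_cons]
      simp [List.replicate_succ, List.append_assoc]

lemma fast_fish_eq_while (n : Nat) : ∀ (days : Int) (fishes : List Int),
    days.toNat = n → fast_fish days fishes = fastFishWhile n fishes := by
  induction n with
  | zero =>
      intro days fishes h
      rw [fast_fish]
      have : ¬ days > 0 := by omega
      simp [this, fastFishWhile]
  | succ k ih =>
      intro days fishes h
      have hpos : days > 0 := by omega
      rw [fast_fish]
      simp only [hpos, if_pos]
      rw [foldl_append_eight, PySem.List.length_pyRange_one]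
      rw [ih (days - 1) _ (by omega)]
      simp [fastFishWhile, PySem.List.pyRepeat_singleton]

-- ===== VERDICT (by name: the statement is the Claim_ definition above) =====
theorem fast_fish_spec : Claim_equal_fast_fish := by
  intro days fishes _ _
  unfold Spec_fast_fish fast_fish_alt
  exact fast_fish_eq_while days.toNat days fishes rfl
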